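-- pv_equiv track=rewrite | github.com/wizard2114/virus | p9_predicates.py | infer_predicates
-- ===== SOURCE A (Python) =====
-- def infer_predicates(facts, rules):
--     derived = set(facts)
--     changed = True
--     while changed:
--         changed = False
--         for (entity, pred) in list(derived):
--             for (cond, result) in rules:
--                 if pred == cond and (entity, result) not in derived:
--                     derived.add((entity, result))
--                     changed = True
--     return derived
-- ===== SOURCE B (Python) =====
-- def infer_predicates(facts, rules):
--     adj = {}
--     for (cond, result) in rules:
--         adj.setdefault(cond, []).append(result)
--     derived = set(facts)
--     queue = list(derived)
--     i = 0
--     while i < len(queue):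
--         (entity, pred) = queue[i]
--         i += 1
--         for result in adj.get(pred, []):
--             if (entity, result) not in derived:
--                 derived.add((entity, result))
--                 queue.append((entity, result))
--     return derived
-- ===== Notes on version B (the rewrite author's own statement) =====
-- stated objective: faster
-- what changed: A's repeated full re-scans of the whole derived set against the whole rule list until a pass adds nothing are replaced by a single-pass worklist (queue) in which each derived pair is processed exactly once against a precomputed cond->results adjacency dict.
import Mathlib
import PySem

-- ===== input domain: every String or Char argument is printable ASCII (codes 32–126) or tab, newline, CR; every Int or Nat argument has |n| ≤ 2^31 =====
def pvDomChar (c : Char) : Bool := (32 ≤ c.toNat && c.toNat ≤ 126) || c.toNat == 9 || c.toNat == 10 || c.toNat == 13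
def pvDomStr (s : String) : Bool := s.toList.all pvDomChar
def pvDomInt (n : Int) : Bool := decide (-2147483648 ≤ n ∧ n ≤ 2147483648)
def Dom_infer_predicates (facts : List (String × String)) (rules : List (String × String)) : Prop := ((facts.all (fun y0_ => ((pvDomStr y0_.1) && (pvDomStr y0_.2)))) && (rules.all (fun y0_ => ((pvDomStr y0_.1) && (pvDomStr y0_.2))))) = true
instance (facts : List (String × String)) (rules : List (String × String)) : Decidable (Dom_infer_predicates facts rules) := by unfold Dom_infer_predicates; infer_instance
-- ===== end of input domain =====

-- B replaces A's repeated full passes over the growing set by a one-pass worklist with a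
-- precomputed cond→results adjacency dict (asymptotically fewer scans); returned sets are equal
-- (the Lean ports even agree as insertion-order lists, which is what is proved below).
-- Both Pythons return a set; the set's hash iteration order is not modelled — A's inner
-- iteration over list(derived) is modelled in insertion order, sound because the resulting
-- SET does not depend on that order, and set outputs are compared as sets.

-- ===== PORT A =====
-- inner 'for (cond, result) in rules' body, threading (derived, changed)
def pvStepA (rules : List (String × String)) (st : List (String × String) × Bool)
    (x : String × String) : List (String × String) × Bool :=
  rules.foldl (fun st cr =>
    if x.2 == cr.1 && !(PySem.Set.contains st.1 (x.1, cr.2)) then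
      (PySem.Set.add st.1 (x.1, cr.2), true)
    else st) st

-- one 'for (entity, pred) in list(derived)' pass over the snapshot
def pvPassA (rules : List (String × String)) (snapshot : List (String × String))
    (st : List (String × String) × Bool) : List (String × String) × Bool :=
  snapshot.foldl (pvStepA rules) st

-- the 'while changed' loop; the fuel argument only makes it total and is proven sufficient below
def pvLoopA (rules : List (String × String)) : Nat → List (String × String) → List (String × String)
  | 0, d => d
  | n + 1, d =>
    let st := pvPassA rules d (d, false)
    if st.2 then pvLoopA rules n st.1 else st.1

def infer_predicates (facts : List (String × String)) (rules : List (String × String)) : List (String × String) :=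
  pvLoopA rules (facts.length * (facts.length + rules.length) + 1) (PySem.Set.ofList facts)

-- ===== PORT B =====
-- adj = {}; for (cond, result) in rules: adj.setdefault(cond, []).append(result)
def pvAdj (rules : List (String × String)) : PySem.Dict String (List String) :=
  rules.foldl (fun d p => d.modify p.1 [] (fun x => x ++ [p.2])) PySem.Dict.empty

-- inner 'for result in adj.get(pred, [])', threading (derived, new queue entries)
def pvStepB (adj : PySem.Dict String (List String))
    (st : List (String × String) × List (String × String))
    (x : String × String) : List (String × String) × List (String × String) :=
  (adj.getD x.2 []).foldl (fun st r =>
    if PySem.Set.contains st.1 (x.1, r) then st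
    else (st.1 ++ [(x.1, r)], st.2 ++ [(x.1, r)])) st

-- 'while i < len(queue)': the queue is modelled by its unprocessed suffix; appended pairs are
-- queued at the end; fuel only makes it total and is proven sufficient below
def pvWl (adj : PySem.Dict String (List String)) :
    Nat → List (String × String) → List (String × String) → List (String × String)
  | 0, d, _ => d
  | _ + 1, d, [] => d
  | n + 1, d, x :: q =>
    let st := pvStepB adj (d, []) x
    pvWl adj n st.1 (q ++ st.2)

def infer_predicates_alt (facts : List (String × String)) (rules : List (String × String)) : List (String × String) :=
  let adj := pvAdj rules
  let derived := PySem.Set.ofList facts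
  pvWl adj (facts.length * (facts.length + rules.length) + 1) derived derived

-- ===== PRECONDITION & SPEC =====
def Spec_infer_predicates (facts : List (String × String)) (rules : List (String × String)) (out : List (String × String)) : Prop := out = infer_predicates_alt facts rules
instance (facts : List (String × String)) (rules : List (String × String)) (out : List (String × String)) : Decidable (Spec_infer_predicates facts rules out) := by unfold Spec_infer_predicates; infer_instance

-- ===== CLAIM (what is proved, stated in full; the proofs are below) =====
def Claim_equal_infer_predicates : Prop := ∀ (facts : List (String × String)) (rules : List (String × String)), Dom_infer_predicates facts rules → Spec_infer_predicates facts rules (infer_predicates facts rules)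

-- ===== LEMMAS AND PROOFS =====

-- results of the rules whose condition matches p, in rule order
def pvMatch (rules : List (String × String)) (p : String) : List String :=
  (rules.filter (fun cr => cr.1 == p)).map (fun cr => cr.2)

-- the pairs added while processing one element (e, _) against the result list rs,
-- membership checked against the growing derived list
def pvNew (rs : List String) (e : String) (D : List (String × String)) : List (String × String) :=
  match rs with
  | [] => []
  | r :: rs => if (e, r) ∈ D then pvNew rs e D else (e, r) :: pvNew rs e (D ++ [(e, r)])

-- the pairs added while scanning a snapshot xs, derived starting at D
def pvAdds (rules : List (String × String)) : List (String × String) → List (String × String) → List (String × String)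
  | [], _ => []
  | x :: xs, D =>
    let n := pvNew (pvMatch rules x.2) x.1 D
    n ++ pvAdds rules xs (D ++ n)

-- finite universe every derived pair lives in
def pvU (facts rules : List (String × String)) : List (String × String) :=
  (PySem.Set.ofList (facts.map Prod.fst)) ×ˢ
    (PySem.Set.ofList (facts.map Prod.snd ++ rules.map Prod.snd))

theorem pvAdds_cons (rules : List (String × String)) (x : String × String)
    (xs D : List (String × String)) :
    pvAdds rules (x :: xs) D =
      pvNew (pvMatch rules x.2) x.1 D ++
        pvAdds rules xs (D ++ pvNew (pvMatch rules x.2) x.1 D) := rfl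

theorem notIsEmpty_append {α : Type} (l l' : List α) :
    (!(l ++ l').isEmpty) = (!l.isEmpty || !l'.isEmpty) := by
  cases l <;> cases l' <;> simp

theorem pvAdj_getD (rules : List (String × String)) (p : String) :
    (pvAdj rules).getD p [] = pvMatch rules p := by
  unfold pvAdj pvMatch
  rw [PySem.Dict.getD_foldl_modify_append]
  simp [PySem.Dict.getD_empty]

theorem pvNew_cons (r : String) (rs : List String) (e : String) (D : List (String × String)) :
    pvNew (r :: rs) e D =
      if (e, r) ∈ D then pvNew rs e D else (e, r) :: pvNew rs e (D ++ [(e, r)]) := rfl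

theorem pvNew_eq_nil (rs : List String) (e : String) (D : List (String × String))
    (h : ∀ r ∈ rs, (e, r) ∈ D) : pvNew rs e D = [] := by
  induction rs with
  | nil => rfl
  | cons r rs ih =>
    unfold pvNew
    rw [if_pos (h r (by simp))]
    exact ih (fun r' hr' => h r' (by simp [hr']))

theorem pvNew_closure (rs : List String) (e : String) :
    ∀ D, ∀ r ∈ rs, (e, r) ∈ D ++ pvNew rs e D := by
  induction rs with
  | nil => intro D r hr; cases hr
  | cons r0 rs ih =>
    intro D r hr
    unfold pvNew
    rcases List.mem_cons.mp hr with h | h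
    · subst h
      split
      · next hmem => exact List.mem_append_left _ hmem
      · simp
    · split
      · exact ih D r h
      · have := ih (D ++ [(e, r0)]) r h
        simpa [List.append_assoc] using this

theorem pvNew_mem (rs : List String) (e : String) :
    ∀ D, ∀ y ∈ pvNew rs e D, y ∉ D ∧ y.1 = e ∧ y.2 ∈ rs := by
  induction rs with
  | nil => intro D y hy; cases hy
  | cons r rs ih =>
    intro D y hy
    unfold pvNew at hy
    split at hy
    · have := ih D y hy
      exact ⟨this.1, this.2.1, by simp [this.2.2]⟩
    · next hnm =>
      rcases List.mem_cons.mp hy with h | h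
      · subst h; exact ⟨hnm, rfl, by simp⟩
      · have := ih (D ++ [(e, r)]) y h
        refine ⟨fun hD => this.1 (List.mem_append_left _ hD), this.2.1, by simp [this.2.2]⟩

theorem pvNew_nodup (rs : List String) (e : String) :
    ∀ D, (pvNew rs e D).Nodup := by
  induction rs with
  | nil => intro D; exact List.nodup_nil
  | cons r rs ih =>
    intro D
    unfold pvNew
    split
    · exact ih D
    · refine List.nodup_cons.mpr ⟨fun hmem => ?_, ih _⟩
      have := (pvNew_mem rs e (D ++ [(e, r)]) _ hmem).1
      exact this (by simp)

theorem pvStepA_eq (rules : List (String × String)) (e p : String) :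
    ∀ (D : List (String × String)) (ch : Bool),
      pvStepA rules (D, ch) (e, p) =
        (D ++ pvNew (pvMatch rules p) e D,
         ch || !(pvNew (pvMatch rules p) e D).isEmpty) := by
  induction rules with
  | nil => intro D ch; simp [pvStepA, pvMatch, pvNew]
  | cons cr rest ih =>
    intro D ch
    have hfold : pvStepA (cr :: rest) (D, ch) (e, p) =
        pvStepA rest
          (if p == cr.1 && !(PySem.Set.contains D (e, cr.2)) then
            (PySem.Set.add D (e, cr.2), true) else (D, ch)) (e, p) := rfl
    by_cases hpc : cr.1 = p
    · subst hpc
      have hmatch : pvMatch (cr :: rest) cr.1 = cr.2 :: pvMatch rest cr.1 := by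
        simp [pvMatch]
      rw [hmatch]
      by_cases hmem : (e, cr.2) ∈ D
      · have hc : PySem.Set.contains D (e, cr.2) = true :=
          (PySem.Set.contains_iff D (e, cr.2)).mpr hmem
        have hif : (if (cr.1 == cr.1 && !(PySem.Set.contains D (e, cr.2))) = true then
            (PySem.Set.add D (e, cr.2), true) else (D, ch)) = (D, ch) := by
          rw [hc]; simp
        rw [hfold, hif, ih D ch]
        conv_rhs => rw [pvNew_cons, if_pos hmem]
      · have hc : PySem.Set.contains D (e, cr.2) = false := by
          rw [← Bool.not_eq_true]
          intro h; exact hmem ((PySem.Set.contains_iff D (e, cr.2)).mp h)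
        have hif : (if (cr.1 == cr.1 && !(PySem.Set.contains D (e, cr.2))) = true then
            (PySem.Set.add D (e, cr.2), true) else (D, ch)) = (D ++ [(e, cr.2)], true) := by
          rw [hc, PySem.Set.add_of_not_mem hmem]; simp
        rw [hfold, hif, ih (D ++ [(e, cr.2)]) true]
        conv_rhs => rw [pvNew_cons, if_neg hmem]
        simp [List.append_assoc]
    · have hmatch : pvMatch (cr :: rest) p = pvMatch rest p := by
        simp [pvMatch, hpc]
      have hb : (p == cr.1) = false := by
        rw [beq_eq_false_iff_ne]
        exact fun h => hpc h.symm
      have hif : (if (p == cr.1 && !(PySem.Set.contains D (e, cr.2))) = true then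
          (PySem.Set.add D (e, cr.2), true) else (D, ch)) = (D, ch) := by
        rw [hb]; simp
      rw [hmatch, hfold, hif]
      exact ih D ch

theorem pvPassA_eq (rules : List (String × String)) :
    ∀ (xs : List (String × String)) (D : List (String × String)) (ch : Bool),
      pvPassA rules xs (D, ch) =
        (D ++ pvAdds rules xs D, ch || !(pvAdds rules xs D).isEmpty) := by
  intro xs
  induction xs with
  | nil => intro D ch; simp [pvPassA, pvAdds]
  | cons x xs ih =>
    intro D ch
    have hfold : pvPassA rules (x :: xs) (D, ch) = pvPassA rules xs (pvStepA rules (D, ch) x) := rfl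
    obtain ⟨e, p⟩ := x
    rw [hfold, pvStepA_eq, ih]
    rw [pvAdds_cons, notIsEmpty_append]
    simp only [List.append_assoc, Bool.or_assoc]

theorem pvStepB_fold (e : String) :
    ∀ (rs : List String) (D ns : List (String × String)),
      rs.foldl (fun st r =>
        if PySem.Set.contains st.1 (e, r) then st
        else (st.1 ++ [(e, r)], st.2 ++ [(e, r)])) (D, ns) =
      (D ++ pvNew rs e D, ns ++ pvNew rs e D) := by
  intro rs
  induction rs with
  | nil => intro D ns; simp [pvNew]
  | cons r rs ih =>
    intro D ns
    simp only [List.foldl_cons]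
    by_cases hmem : (e, r) ∈ D
    · rw [if_pos ((PySem.Set.contains_iff D (e, r)).mpr hmem)]
      rw [ih D ns]
      conv_rhs => rw [pvNew_cons, if_pos hmem]
    · rw [if_neg (fun h => hmem ((PySem.Set.contains_iff D (e, r)).mp h))]
      rw [ih (D ++ [(e, r)]) (ns ++ [(e, r)])]
      conv_rhs => rw [pvNew_cons, if_neg hmem]
      simp [List.append_assoc]

theorem pvWl_cons (rules : List (String × String)) (n : Nat) (D q : List (String × String))
    (x : String × String) :
    pvWl (pvAdj rules) (n + 1) D (x :: q) =
      pvWl (pvAdj rules) n (D ++ pvNew (pvMatch rules x.2) x.1 D)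
        (q ++ pvNew (pvMatch rules x.2) x.1 D) := by
  show pvWl _ n (pvStepB (pvAdj rules) (D, []) x).1 (q ++ (pvStepB (pvAdj rules) (D, []) x).2) = _
  obtain ⟨e, p⟩ := x
  unfold pvStepB
  rw [pvAdj_getD, pvStepB_fold]
  simp

theorem pvAdds_append (rules : List (String × String)) :
    ∀ (xs ys D : List (String × String)),
      pvAdds rules (xs ++ ys) D =
        pvAdds rules xs D ++ pvAdds rules ys (D ++ pvAdds rules xs D) := by
  intro xs
  induction xs with
  | nil => intro ys D; simp [pvAdds]
  | cons x xs ih =>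
    intro ys D
    rw [List.cons_append, pvAdds_cons, pvAdds_cons, ih]
    simp [List.append_assoc]

theorem pvAdds_nil_of_closed (rules : List (String × String)) :
    ∀ (xs D D0 : List (String × String)),
      (∀ x ∈ xs, ∀ r ∈ pvMatch rules x.2, (x.1, r) ∈ D0) → D0 ⊆ D →
      pvAdds rules xs D = [] := by
  intro xs
  induction xs with
  | nil => intro D D0 _ _; rfl
  | cons x xs ih =>
    intro D D0 hcl hsub
    unfold pvAdds
    have hn : pvNew (pvMatch rules x.2) x.1 D = [] :=
      pvNew_eq_nil _ _ _ (fun r hr => hsub (hcl x (by simp) r hr))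
    simp only [hn, List.nil_append, List.append_nil]
    exact ih D D0 (fun x' hx' => hcl x' (by simp [hx'])) hsub

theorem pvAdds_mem (rules : List (String × String)) :
    ∀ (xs D : List (String × String)), ∀ y ∈ pvAdds rules xs D,
      ∃ x ∈ xs, y.1 = x.1 ∧ y.2 ∈ rules.map Prod.snd := by
  intro xs
  induction xs with
  | nil => intro D y hy; cases hy
  | cons x xs ih =>
    intro D y hy
    unfold pvAdds at hy
    rcases List.mem_append.mp hy with h | h
    · have := pvNew_mem _ _ _ _ h
      refine ⟨x, by simp, this.2.1, ?_⟩
      have hr := this.2.2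
      unfold pvMatch at hr
      rcases List.mem_map.mp hr with ⟨cr, hcr, hcr2⟩
      exact List.mem_map.mpr ⟨cr, List.mem_of_mem_filter hcr, hcr2⟩
    · obtain ⟨x', hx', h1, h2⟩ := ih _ y h
      exact ⟨x', by simp [hx'], h1, h2⟩

theorem pvAdds_closure (rules : List (String × String)) :
    ∀ (xs D : List (String × String)), ∀ x ∈ xs, ∀ r ∈ pvMatch rules x.2,
      (x.1, r) ∈ D ++ pvAdds rules xs D := by
  intro xs
  induction xs with
  | nil => intro D x hx; cases hx
  | cons x0 xs ih =>
    intro D x hx r hr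
    unfold pvAdds
    rcases List.mem_cons.mp hx with h | h
    · subst h
      have := pvNew_closure (pvMatch rules x.2) x.1 D r hr
      rcases List.mem_append.mp this with h' | h'
      · exact List.mem_append_left _ h'
      · exact List.mem_append_right _ (List.mem_append_left _ h')
    · have := ih (D ++ pvNew (pvMatch rules x0.2) x0.1 D) x h r hr
      simpa [List.append_assoc] using this

theorem pvAdds_nodup (rules : List (String × String)) :
    ∀ (xs D : List (String × String)), D.Nodup → (D ++ pvAdds rules xs D).Nodup := by
  intro xs
  induction xs with
  | nil => intro D h; simpa [pvAdds]
  | cons x xs ih =>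
    intro D h
    unfold pvAdds
    have hDn : (D ++ pvNew (pvMatch rules x.2) x.1 D).Nodup := by
      refine List.Nodup.append h (pvNew_nodup _ _ _) ?_
      intro a haD han
      exact (pvNew_mem _ _ _ _ han).1 haD
    have := ih (D ++ pvNew (pvMatch rules x.2) x.1 D) hDn
    simpa [List.append_assoc] using this

theorem pvWl_nil_of_no_adds (rules : List (String × String)) :
    ∀ (pending : List (String × String)) (m : Nat) (D : List (String × String)),
      pvAdds rules pending D = [] → pending.length ≤ m →
      pvWl (pvAdj rules) m D pending = D := by
  intro pending
  induction pending with
  | nil => intro m D _ _; cases m <;> rfl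
  | cons x q ih =>
    intro m D hadds hlen
    obtain ⟨m, rfl⟩ : ∃ m', m = m' + 1 := ⟨m - 1, by simp only [List.length_cons] at hlen; omega⟩
    rw [pvAdds_cons] at hadds
    have hn : pvNew (pvMatch rules x.2) x.1 D = [] := by
      rcases List.append_eq_nil_iff.mp hadds with ⟨h1, _⟩; exact h1
    have hq : pvAdds rules q (D ++ pvNew (pvMatch rules x.2) x.1 D) = [] := by
      rcases List.append_eq_nil_iff.mp hadds with ⟨_, h2⟩; exact h2
    rw [pvWl_cons, hn]
    simp only [List.append_nil]
    apply ih m D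
    · simpa [hn] using hq
    · simpa using Nat.le_of_succ_le_succ (by simpa using hlen)

theorem pvWl_chunk (rules : List (String × String)) :
    ∀ (pending : List (String × String)) (k : Nat) (D q : List (String × String)),
      pvWl (pvAdj rules) (pending.length + k) D (pending ++ q) =
        pvWl (pvAdj rules) k (D ++ pvAdds rules pending D)
          (q ++ pvAdds rules pending D) := by
  intro pending
  induction pending with
  | nil => intro k D q; simp [pvAdds]
  | cons x xs ih =>
    intro k D q
    have h1 : (x :: xs).length + k = (xs.length + k) + 1 := by simp only [List.length_cons]; omega
    rw [h1]
    show pvWl _ ((xs.length + k) + 1) D (x :: (xs ++ q)) = _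
    rw [pvWl_cons]
    have := ih k (D ++ pvNew (pvMatch rules x.2) x.1 D)
      (q ++ pvNew (pvMatch rules x.2) x.1 D)
    rw [show xs ++ q ++ pvNew (pvMatch rules x.2) x.1 D =
      xs ++ (q ++ pvNew (pvMatch rules x.2) x.1 D) from List.append_assoc _ _ _, this]
    rw [pvAdds_cons]
    simp [List.append_assoc]

theorem pvMain (facts rules : List (String × String)) :
    ∀ (n m : Nat) (D pre pending : List (String × String)),
      D = pre ++ pending →
      D.Nodup → D ⊆ pvU facts rules →
      (∀ x ∈ pre, ∀ r ∈ pvMatch rules x.2, (x.1, r) ∈ D) →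
      (pvU facts rules).length + 1 ≤ n + D.length →
      (pvU facts rules).length + pending.length ≤ m + D.length →
      pvLoopA rules n D = pvWl (pvAdj rules) m D pending := by
  intro n
  induction n with
  | zero =>
    intro m D pre pending hD hnd hsub hcl hn hm
    have : D.length ≤ (pvU facts rules).length := (hnd.subperm hsub).length_le
    omega
  | succ n ih =>
    intro m D pre pending hD hnd hsub hcl hn hm
    have hDU : D.length ≤ (pvU facts rules).length := (hnd.subperm hsub).length_le
    have hpass : pvPassA rules D (D, false) =
        (D ++ pvAdds rules D D, !(pvAdds rules D D).isEmpty) := by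
      rw [pvPassA_eq]; simp
    have hsplit : pvAdds rules D D = pvAdds rules pending D := by
      conv_lhs => rw [show pvAdds rules D D = pvAdds rules (pre ++ pending) D by rw [← hD]]
      rw [pvAdds_append]
      have hpre : pvAdds rules pre D = [] :=
        pvAdds_nil_of_closed rules pre D D hcl (fun a ha => ha)
      simp [hpre]
    set A := pvAdds rules pending D with hAdef
    have hloop : pvLoopA rules (n + 1) D =
        (if !(A.isEmpty) then pvLoopA rules n (D ++ A) else D ++ A) := by
      show (let st := pvPassA rules D (D, false);
        if st.2 then pvLoopA rules n st.1 else st.1) = _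
      rw [hpass, hsplit]
    by_cases hA : A = []
    · rw [hloop, hA]
      simp only [List.isEmpty_nil, Bool.not_true, Bool.false_eq_true, if_false, List.append_nil]
      symm
      exact pvWl_nil_of_no_adds rules pending m D (hA ▸ rfl) (by omega)
    · have hAne : (!(A.isEmpty)) = true := by
        simp [hA]
      rw [hloop, if_pos hAne]
      have hpm : pending.length ≤ m := by omega
      obtain ⟨k, hk⟩ : ∃ k, m = pending.length + k := ⟨m - pending.length, by omega⟩
      have hrhs : pvWl (pvAdj rules) m D pending = pvWl (pvAdj rules) k (D ++ A) A := by
        rw [hk]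
        have := pvWl_chunk rules pending k D []
        simpa using this
      rw [hrhs]
      have hAsub : ∀ y ∈ A, y ∈ pvU facts rules := by
        intro y hy
        obtain ⟨x, hx, h1, h2⟩ := pvAdds_mem rules pending D y hy
        have hxD : x ∈ D := by rw [hD]; exact List.mem_append_right _ hx
        have hxU := hsub hxD
        obtain ⟨e, p⟩ := y
        obtain ⟨e', p'⟩ := x
        simp only at h1 h2
        subst h1
        unfold pvU at hxU ⊢
        rcases List.pair_mem_product.mp hxU with ⟨he, _⟩
        refine List.pair_mem_product.mpr ⟨he, ?_⟩
        rw [PySem.Set.mem_ofList]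
        exact List.mem_append_right _ h2
      refine ih k (D ++ A) D A rfl ?_ ?_ ?_ ?_ ?_
      · rw [hAdef]; exact pvAdds_nodup rules pending D hnd
      · intro y hy
        rcases List.mem_append.mp hy with h | h
        · exact hsub h
        · exact hAsub y h
      · intro x hx r hr
        rw [hD] at hx
        rcases List.mem_append.mp hx with h | h
        · exact List.mem_append_left _ (hcl x h r hr)
        · exact pvAdds_closure rules pending D x h r hr
      · have : A.length ≠ 0 := fun h => hA (List.eq_nil_of_length_eq_zero h)
        simp only [List.length_append]
        omega
      · simp only [List.length_append]
        omega

-- ===== VERDICT (by name: the statement is the Claim_ definition above) =====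
theorem infer_predicates_spec : Claim_equal_infer_predicates := by
  intro facts rules _
  show infer_predicates facts rules = infer_predicates_alt facts rules
  unfold infer_predicates infer_predicates_alt
  have hU : (pvU facts rules).length ≤ facts.length * (facts.length + rules.length) := by
    unfold pvU
    rw [List.length_product]
    have h1 : (PySem.Set.ofList (facts.map Prod.fst)).length ≤ facts.length := by
      have := PySem.Set.length_ofList_le (facts.map Prod.fst)
      simpa using this
    have h2 : (PySem.Set.ofList (facts.map Prod.snd ++ rules.map Prod.snd)).length ≤
        facts.length + rules.length := by
      have := PySem.Set.length_ofList_le (facts.map Prod.snd ++ rules.map Prod.snd)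
      simpa using this
    exact Nat.mul_le_mul h1 h2
  apply pvMain facts rules _ _ _ [] (PySem.Set.ofList facts) rfl
    (PySem.Set.nodup_ofList facts)
  · intro y hy
    have hyf : y ∈ facts := by simp only [List.nil_append] at hy; rw [PySem.Set.mem_ofList] at hy; exact hy
    obtain ⟨e, p⟩ := y
    unfold pvU
    refine List.pair_mem_product.mpr ⟨?_, ?_⟩
    · rw [PySem.Set.mem_ofList]; exact List.mem_map.mpr ⟨(e, p), hyf, rfl⟩
    · rw [PySem.Set.mem_ofList]
      exact List.mem_append_left _ (List.mem_map.mpr ⟨(e, p), hyf, rfl⟩)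
  · intro x hx; cases hx
  · simp only [List.nil_append]; omega
  · simp only [List.nil_append]; omega
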